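-- pv_equiv track=rewrite | github.com/xpakx/aoc | 2025_everybody_codes/quest17.py | part1
-- ===== SOURCE A (Python) =====
-- def check(start, point, r2):
--     check = (start[0] - point[0])**2 + (start[1] - point[1])**2
--     return check <= r2
--
-- def part1(data, start):
--     r = 10
--     r2 = r**2
--     result = 0
--     for i, row in enumerate(data):
--         for j, val in enumerate(row):
--             if check(start, (i, j), r2):
--                 result += val
--     return result
-- ===== SOURCE B (Python) =====
-- # Only cells within the radius-10 bounding window around start can contribute,
-- # so scan just that window (clamped to the grid) instead of the whole grid.
-- _DJ = [0, 4, 6, 7, 8, 8, 9, 9, 9, 9, 10, 9, 9, 9, 9, 8, 8, 7, 6, 4, 0]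
--
-- def part1(data, start):
--     si, sj = start
--     total = 0
--     for di in range(-10, 11):
--         i = si + di
--         if 0 <= i < len(data):
--             row = data[i]
--             dj = _DJ[di + 10]
--             for j in range(max(0, sj - dj), min(len(row), sj + dj + 1)):
--                 total += row[j]
--     return total
-- ===== Notes on version B (the rewrite author's own statement) =====
-- stated objective: faster
-- what changed: Instead of scanning every grid cell and testing its distance to start, B iterates only the 21 candidate rows within vertical distance 10 of start (clamped to the grid) and, per row, sums exactly the contiguous column window given by a precomputed integer-square-root table, so no distance test is performed at all.
import Mathlib
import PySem

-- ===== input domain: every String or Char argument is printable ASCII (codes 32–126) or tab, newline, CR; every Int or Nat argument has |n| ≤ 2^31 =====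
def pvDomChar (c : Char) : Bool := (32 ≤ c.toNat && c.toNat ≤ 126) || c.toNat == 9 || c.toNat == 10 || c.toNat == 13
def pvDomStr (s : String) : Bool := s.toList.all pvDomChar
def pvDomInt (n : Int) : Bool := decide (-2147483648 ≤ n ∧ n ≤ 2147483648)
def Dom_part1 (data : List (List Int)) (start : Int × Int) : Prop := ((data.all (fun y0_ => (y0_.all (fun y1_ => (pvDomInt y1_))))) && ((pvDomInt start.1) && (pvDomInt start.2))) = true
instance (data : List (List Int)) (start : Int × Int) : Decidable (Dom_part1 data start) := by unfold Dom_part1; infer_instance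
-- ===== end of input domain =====

-- B scans only the radius-10 window around start (clamped to the grid) instead of the whole grid.

-- ===== PORT A =====
def check (start point : Int × Int) (r2 : Int) : Bool :=
  decide ((start.1 - point.1) ^ 2 + (start.2 - point.2) ^ 2 ≤ r2)

def part1 (data : List (List Int)) (start : Int × Int) : Int :=
  let r : Int := 10
  let r2 := r ^ 2
  (PySem.List.enumerate data 0).foldl (fun result p =>
    (PySem.List.enumerate p.2 0).foldl (fun result q =>
      if check start (p.1, q.1) r2 then result + q.2 else result) result) 0

-- ===== PORT B =====
def djTable : List Int := [0, 4, 6, 7, 8, 8, 9, 9, 9, 9, 10, 9, 9, 9, 9, 8, 8, 7, 6, 4, 0]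

def part1_alt (data : List (List Int)) (start : Int × Int) : Int :=
  (PySem.List.pyRange (-10) 11 1).foldl (fun total di =>
    let i := start.1 + di
    if 0 ≤ i ∧ i < (data.length : Int) then
      -- data[i]: the guard ensures the index is in range, so the default is never used
      let row := PySem.List.pyGetD data i []
      -- _DJ[di + 10]: di ∈ [-10,10], so di + 10 ∈ [0,20] is in range
      let dj := PySem.List.pyGetD djTable (di + 10) 0
      (PySem.List.pyRange (max 0 (start.2 - dj)) (min (row.length : Int) (start.2 + dj + 1)) 1).foldl
        (fun total j => total + PySem.List.pyGetD row j 0) total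
    else total) 0

-- ===== PRECONDITION & SPEC =====
def Spec_part1 (data : List (List Int)) (start : Int × Int) (out : Int) : Prop := out = part1_alt data start
instance (data : List (List Int)) (start : Int × Int) (out : Int) : Decidable (Spec_part1 data start out) := by unfold Spec_part1; infer_instance

-- ===== CLAIM (what is proved, stated in full; the proofs are below) =====
def Claim_equal_part1 : Prop := ∀ (data : List (List Int)) (start : Int × Int), Dom_part1 data start → Spec_part1 data start (part1 data start)

-- ===== LEMMAS AND PROOFS =====

-- the contribution of cell (i, j) of row r, as a function of the column index j
def fj (si sj i : Int) (r : List Int) (j : Int) : Int :=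
  if 0 ≤ j ∧ j < (r.length : Int) ∧ (si - i) ^ 2 + (sj - j) ^ 2 ≤ 100 then PySem.List.pyGetD r j 0 else 0

-- the contribution of row index i of the whole grid
def rowSum (si sj i : Int) (r : List Int) : Int :=
  ((PySem.List.pyRange 0 (r.length : Int) 1).map (fj si sj i r)).sum

def F (data : List (List Int)) (si sj i : Int) : Int :=
  if 0 ≤ i ∧ i < (data.length : Int) then rowSum si sj i (PySem.List.pyGetD data i []) else 0

-- integer square-root characterisation: x² ≤ c ↔ |x| ≤ d, when d = isqrt c
theorem sq_le_iff_abs_le (x d c : Int) (hd : 0 ≤ d) (h1 : d ^ 2 ≤ c) (h2 : c < (d + 1) ^ 2) :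
    x ^ 2 ≤ c ↔ (-d ≤ x ∧ x ≤ d) := by
  constructor
  · intro h
    constructor
    · by_contra hc; push Not at hc; nlinarith
    · by_contra hc; push Not at hc; nlinarith
  · rintro ⟨ha, hb⟩; nlinarith

-- table correctness: djTable[di+10] is the integer square root of 100 - di²
theorem djTable_spec (di : Int) (h1 : -10 ≤ di) (h2 : di ≤ 10) :
    0 ≤ PySem.List.pyGetD djTable (di + 10) 0 ∧
    (PySem.List.pyGetD djTable (di + 10) 0) ^ 2 + di ^ 2 ≤ 100 ∧
    100 < (PySem.List.pyGetD djTable (di + 10) 0 + 1) ^ 2 + di ^ 2 := by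
  interval_cases di <;> decide

theorem sum_map_filter_ne_zero (f : Int → Int) (L : List Int) :
    (L.map f).sum = ((L.filter (fun i => f i != 0)).map f).sum := by
  induction L with
  | nil => rfl
  | cons x xs ih =>
    by_cases hx : f x = 0 <;> simp [hx, ih]

-- two duplicate-free index lists containing the same indices of nonzero value give the same sum
theorem sum_map_eq_of_support (f : Int → Int) (L1 L2 : List Int)
    (h1 : L1.Nodup) (h2 : L2.Nodup)
    (hmem : ∀ i, f i ≠ 0 → (i ∈ L1 ↔ i ∈ L2)) :
    (L1.map f).sum = (L2.map f).sum := by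
  rw [sum_map_filter_ne_zero f L1, sum_map_filter_ne_zero f L2]
  have hperm : (L1.filter (fun i => f i != 0)).Perm (L2.filter (fun i => f i != 0)) := by
    rw [List.perm_ext_iff_of_nodup (h1.filter _) (h2.filter _)]
    intro a
    simp only [List.mem_filter, bne_iff_ne, ne_eq]
    constructor
    · rintro ⟨ha, hz⟩; exact ⟨(hmem a hz).mp ha, hz⟩
    · rintro ⟨ha, hz⟩; exact ⟨(hmem a hz).mpr ha, hz⟩
  exact (hperm.map f).sum_eq

-- row contribution is zero when the row index is more than 10 away from start
theorem rowSum_zero (si sj i : Int) (r : List Int) (h : 100 < (si - i) ^ 2) :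
    rowSum si sj i r = 0 := by
  unfold rowSum
  have hz : ∀ j ∈ PySem.List.pyRange 0 (r.length : Int) 1, fj si sj i r j = 0 := by
    intro j _
    unfold fj
    rw [if_neg]
    rintro ⟨_, _, hc⟩
    nlinarith [sq_nonneg (sj - j)]
  rw [List.map_congr_left hz]
  simp

theorem F_support (data : List (List Int)) (si sj i : Int) (h : F data si sj i ≠ 0) :
    0 ≤ i ∧ i < (data.length : Int) ∧ si - 10 ≤ i ∧ i ≤ si + 10 := by
  unfold F at h
  by_cases hg : 0 ≤ i ∧ i < (data.length : Int)
  · rw [if_pos hg] at h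
    refine ⟨hg.1, hg.2, ?_, ?_⟩ <;>
    · by_contra hc
      exact h (rowSum_zero si sj i _ (by nlinarith))
  · rw [if_neg hg] at h; exact absurd rfl h

-- A's inner loop over a row equals the full-row sum of fj
theorem inner_eq (si sj i : Int) (r : List Int) (result : Int) :
    (PySem.List.enumerate r 0).foldl (fun result q =>
      if check (si, sj) (i, q.1) ((10 : Int) ^ 2) then result + q.2 else result) result
    = result + rowSum si sj i r := by
  rw [PySem.List.foldl_congr_mem _ _ (fun res (q : Int × Int) =>
        res + if check (si, sj) (i, q.1) ((10 : Int) ^ 2) then q.2 else 0) _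
      (by
        intro acc x _
        show (if check (si, sj) (i, x.1) ((10 : Int) ^ 2) = true then acc + x.2 else acc)
          = acc + (if check (si, sj) (i, x.1) ((10 : Int) ^ 2) = true then x.2 else 0)
        by_cases hc : check (si, sj) (i, x.1) ((10 : Int) ^ 2) = true
        · rw [if_pos hc, if_pos hc]
        · rw [if_neg hc, if_neg hc, add_zero])]
  rw [PySem.List.foldl_add]
  congr 1
  rw [PySem.List.enumerate_eq_map_pyRange r 0, PySem.List.len_eq, List.map_map]
  unfold rowSum
  refine congrArg List.sum (List.map_congr_left ?_)
  intro j hj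
  rw [PySem.List.mem_pyRange_one] at hj
  simp only [Function.comp_apply, check, decide_eq_true_iff]
  unfold fj
  by_cases hc : (si - i) ^ 2 + (sj - j) ^ 2 ≤ 100
  · rw [if_pos (by linarith [hc]), if_pos ⟨hj.1, hj.2, hc⟩]
  · rw [if_neg (fun h => hc (by linarith [h])),
        if_neg (fun h => hc h.2.2)]

theorem part1_eq_sum (data : List (List Int)) (si sj : Int) :
    part1 data (si, sj) = ((PySem.List.pyRange 0 (data.length : Int) 1).map (F data si sj)).sum := by
  show (PySem.List.enumerate data 0).foldl _ 0 = _
  rw [PySem.List.foldl_congr_mem _ _ (fun (acc : Int) (p : Int × List Int) =>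
        acc + rowSum si sj p.1 p.2) _
      (by intro acc p _; exact inner_eq si sj p.1 p.2 acc)]
  rw [PySem.List.foldl_add, zero_add]
  rw [PySem.List.enumerate_eq_map_pyRange data ([] : List Int), PySem.List.len_eq, List.map_map]
  refine congrArg List.sum (List.map_congr_left ?_)
  intro i hi
  rw [PySem.List.mem_pyRange_one] at hi
  simp only [Function.comp_apply]
  unfold F
  rw [if_pos ⟨hi.1, hi.2⟩]

-- B's inner loop over the clamped window equals the full-row sum of fj
theorem win_eq (si sj i : Int) (r : List Int) (dj : Int) (h0 : 0 ≤ dj)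
    (h1 : dj ^ 2 + (si - i) ^ 2 ≤ 100) (h2 : 100 < (dj + 1) ^ 2 + (si - i) ^ 2) (total : Int) :
    (PySem.List.pyRange (max 0 (sj - dj)) (min (r.length : Int) (sj + dj + 1)) 1).foldl
      (fun total j => total + PySem.List.pyGetD r j 0) total
    = total + rowSum si sj i r := by
  rw [PySem.List.foldl_add]
  congr 1
  have hiff : ∀ x : Int, (sj - x) ^ 2 ≤ 100 - (si - i) ^ 2 ↔ -dj ≤ sj - x ∧ sj - x ≤ dj :=
    fun x => sq_le_iff_abs_le _ dj _ h0 (by linarith) (by linarith)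
  have e1 : (PySem.List.pyRange (max 0 (sj - dj)) (min (r.length : Int) (sj + dj + 1)) 1).map
        (fun j => PySem.List.pyGetD r j 0)
      = (PySem.List.pyRange (max 0 (sj - dj)) (min (r.length : Int) (sj + dj + 1)) 1).map
        (fj si sj i r) := by
    apply List.map_congr_left
    intro j hj
    rw [PySem.List.mem_pyRange_one] at hj
    have hb : -dj ≤ sj - j ∧ sj - j ≤ dj := by omega
    have hc : (si - i) ^ 2 + (sj - j) ^ 2 ≤ 100 := by
      have := (hiff j).mpr hb; linarith
    unfold fj
    rw [if_pos ⟨by omega, by omega, hc⟩]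
  rw [e1]
  unfold rowSum
  apply sum_map_eq_of_support
  · exact PySem.List.nodup_pyRange_one _ _
  · exact PySem.List.nodup_pyRange_one _ _
  · intro j hz
    by_cases hg : 0 ≤ j ∧ j < (r.length : Int) ∧ (si - i) ^ 2 + (sj - j) ^ 2 ≤ 100
    · have hb : -dj ≤ sj - j ∧ sj - j ≤ dj := (hiff j).mp (by linarith [hg.2.2])
      rw [PySem.List.mem_pyRange_one, PySem.List.mem_pyRange_one]
      omega
    · exact absurd (by unfold fj; rw [if_neg hg]) hz

theorem part1_alt_eq_sum (data : List (List Int)) (si sj : Int) :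
    part1_alt data (si, sj) =
      ((PySem.List.pyRange (si - 10) (si + 11) 1).map (F data si sj)).sum := by
  show (PySem.List.pyRange (-10) 11 1).foldl _ 0 = _
  rw [PySem.List.foldl_congr_mem _ _ (fun (total di : Int) =>
        total + F data si sj (si + di)) _
      (by
        intro acc di hdi
        rw [PySem.List.mem_pyRange_one] at hdi
        obtain ⟨hd0, hd1, hd2⟩ := djTable_spec di (by omega) (by omega)
        show (if 0 ≤ si + di ∧ si + di < (data.length : Int) then
            (PySem.List.pyRange (max 0 (sj - PySem.List.pyGetD djTable (di + 10) 0))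
                (min ((PySem.List.pyGetD data (si + di) []).length : Int)
                  (sj + PySem.List.pyGetD djTable (di + 10) 0 + 1)) 1).foldl
              (fun total j => total + PySem.List.pyGetD (PySem.List.pyGetD data (si + di) []) j 0) acc
          else acc) = acc + F data si sj (si + di)
        unfold F
        by_cases hg : 0 ≤ si + di ∧ si + di < (data.length : Int)
        · rw [if_pos hg, if_pos hg]
          exact win_eq si sj (si + di) _ _ hd0 (by linarith) (by linarith) acc
        · rw [if_neg hg, if_neg hg, add_zero])]
  rw [PySem.List.foldl_add, zero_add]
  have e2 : (PySem.List.pyRange (-10) 11 1).map (fun di => si + di)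
      = PySem.List.pyRange (si - 10) (si + 11) 1 := by
    rw [PySem.List.pyRange_one, PySem.List.pyRange_one, List.map_map]
    have h21 : ((11 : Int) - (-10)).toNat = ((si + 11) - (si - 10)).toNat := by omega
    rw [← h21]
    apply List.map_congr_left
    intro k _
    simp only [Function.comp_apply]
    omega
  rw [← e2, List.map_map]
  rfl

-- ===== VERDICT (by name: the statement is the Claim_ definition above) =====
theorem part1_spec : Claim_equal_part1 := by
  intro data start _
  unfold Spec_part1
  obtain ⟨si, sj⟩ := start
  rw [part1_eq_sum, part1_alt_eq_sum]
  apply sum_map_eq_of_support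
  · exact PySem.List.nodup_pyRange_one 0 _
  · exact PySem.List.nodup_pyRange_one _ _
  · intro i hi
    obtain ⟨a, b, c, d⟩ := F_support data si sj i hi
    rw [PySem.List.mem_pyRange_one, PySem.List.mem_pyRange_one]
    omega
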